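-- pv_equiv track=rewrite | github.com/yarks165/MoKA | case_study/vn.py | generate_venn_data
-- ===== SOURCE A (Python) =====
-- def generate_venn_data(your_results, baseline_results, llama_results):
--     """生成Venn图所需的重叠计数"""
--     sets = {
--         'yours_correct': set(),
--         'baseline_correct': set(),
--         'llama_correct': set()
--     }
--
--     for sample_id in your_results:
--         try:
--             # 你的模型正确
--             y_correct = your_results[sample_id]['correct']
--             # baseline错误
--             b_correct = baseline_results[sample_id]['correct']
--             # llama错误
--             l_correct = llama_results[sample_id]['correct']
--
--             if y_correct: sets['yours_correct'].add(sample_id)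
--             if b_correct: sets['baseline_correct'].add(sample_id)
--             if l_correct: sets['llama_correct'].add(sample_id)
--         except KeyError:
--             continue
--
--     # 计算各区域样本数
--     venn_data = {
--         'your_only': len(sets['yours_correct'] - sets['baseline_correct'] - sets['llama_correct']),
--         'baseline_only': len(sets['baseline_correct'] - sets['yours_correct'] - sets['llama_correct']),
--         'llama_only': len(sets['llama_correct'] - sets['yours_correct'] - sets['baseline_correct']),
--         'your_baseline': len(sets['yours_correct'] & sets['baseline_correct'] - sets['llama_correct']),
--         'your_llama': len(sets['yours_correct'] & sets['llama_correct'] - sets['baseline_correct']),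
--         'baseline_llama': len(sets['baseline_correct'] & sets['llama_correct'] - sets['yours_correct']),
--         'all_correct': len(sets['yours_correct'] & sets['baseline_correct'] & sets['llama_correct'])
--     }
--     return venn_data
-- ===== SOURCE B (Python) =====
-- def generate_venn_data(your_results, baseline_results, llama_results):
--     """生成Venn图所需的重叠计数"""
--     your_only = baseline_only = llama_only = 0
--     your_baseline = your_llama = baseline_llama = all_correct = 0
--     for sample_id in your_results:
--         try:
--             y = bool(your_results[sample_id]['correct'])
--             b = bool(baseline_results[sample_id]['correct'])
--             l = bool(llama_results[sample_id]['correct'])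
--         except KeyError:
--             continue
--         if y and b and l:
--             all_correct += 1
--         elif y and b:
--             your_baseline += 1
--         elif y and l:
--             your_llama += 1
--         elif b and l:
--             baseline_llama += 1
--         elif y:
--             your_only += 1
--         elif b:
--             baseline_only += 1
--         elif l:
--             llama_only += 1
--     return {
--         'your_only': your_only,
--         'baseline_only': baseline_only,
--         'llama_only': llama_only,
--         'your_baseline': your_baseline,
--         'your_llama': your_llama,
--         'baseline_llama': baseline_llama,
--         'all_correct': all_correct,
--     }
-- ===== Notes on version B (the rewrite author's own statement) =====
-- stated objective: simpler
-- what changed: Instead of building three membership sets and then taking seven set-difference/intersection lengths, B classifies each sample into its Venn region in a single pass and increments one of seven plain counters, never materializing any set.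
import Mathlib
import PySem

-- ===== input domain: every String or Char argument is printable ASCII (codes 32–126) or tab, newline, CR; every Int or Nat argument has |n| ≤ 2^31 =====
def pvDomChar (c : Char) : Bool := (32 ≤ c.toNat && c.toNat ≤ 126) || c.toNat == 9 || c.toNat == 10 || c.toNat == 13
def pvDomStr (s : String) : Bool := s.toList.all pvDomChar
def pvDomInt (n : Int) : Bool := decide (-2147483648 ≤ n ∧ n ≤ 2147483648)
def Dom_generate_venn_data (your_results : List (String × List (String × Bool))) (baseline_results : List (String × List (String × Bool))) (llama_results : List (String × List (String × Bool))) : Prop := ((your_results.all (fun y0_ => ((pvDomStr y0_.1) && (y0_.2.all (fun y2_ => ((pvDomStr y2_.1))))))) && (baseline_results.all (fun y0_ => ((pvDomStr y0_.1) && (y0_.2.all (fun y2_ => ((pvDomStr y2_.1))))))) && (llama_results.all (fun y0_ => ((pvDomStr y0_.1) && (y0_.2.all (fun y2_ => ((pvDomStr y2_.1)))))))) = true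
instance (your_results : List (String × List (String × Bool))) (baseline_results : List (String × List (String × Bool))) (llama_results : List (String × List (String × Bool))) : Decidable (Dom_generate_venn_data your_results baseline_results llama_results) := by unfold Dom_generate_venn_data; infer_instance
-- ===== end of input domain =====

-- B replaces A's three membership sets and seven set-difference/intersection lengths by a single
-- pass that classifies each sample into its Venn region and bumps one of seven plain counters
-- (objective: simpler).

-- ===== PORT A =====
-- shared helper: the try-block body `res[sid]['correct']` of both Pythons; none = KeyError
def pvGetCorrect (res : List (String × List (String × Bool))) (sid : String) : Option Bool :=
  match (PySem.Dict.mk res).get? sid with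
  | none => none
  | some inner => (PySem.Dict.mk inner).get? "correct"

-- the three lookups of one try block; none ⇔ some lookup raised KeyError (then the sample is skipped)
def pvTri (your_results baseline_results llama_results : List (String × List (String × Bool)))
    (sid : String) : Option (Bool × Bool × Bool) :=
  match pvGetCorrect your_results sid, pvGetCorrect baseline_results sid,
        pvGetCorrect llama_results sid with
  | some yc, some bc, some lc => some (yc, bc, lc)
  | _, _, _ => none

def generate_venn_data (your_results : List (String × List (String × Bool))) (baseline_results : List (String × List (String × Bool))) (llama_results : List (String × List (String × Bool))) : List (String × Int) :=
  let sets : PySem.Set String × PySem.Set String × PySem.Set String :=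
    your_results.foldl (fun st p =>
      match pvTri your_results baseline_results llama_results p.1 with
      | some t =>
        ((if t.1 then PySem.Set.add st.1 p.1 else st.1),
         (if t.2.1 then PySem.Set.add st.2.1 p.1 else st.2.1),
         (if t.2.2 then PySem.Set.add st.2.2 p.1 else st.2.2))
      | none => st) (PySem.Set.empty, PySem.Set.empty, PySem.Set.empty)
  let ys := sets.1
  let bs := sets.2.1
  let ls := sets.2.2
  -- Python precedence: `a & b - c` is `a & (b - c)`
  [("your_only", PySem.Set.len (PySem.Set.diff (PySem.Set.diff ys bs) ls)),
   ("baseline_only", PySem.Set.len (PySem.Set.diff (PySem.Set.diff bs ys) ls)),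
   ("llama_only", PySem.Set.len (PySem.Set.diff (PySem.Set.diff ls ys) bs)),
   ("your_baseline", PySem.Set.len (PySem.Set.inter ys (PySem.Set.diff bs ls))),
   ("your_llama", PySem.Set.len (PySem.Set.inter ys (PySem.Set.diff ls bs))),
   ("baseline_llama", PySem.Set.len (PySem.Set.inter bs (PySem.Set.diff ls ys))),
   ("all_correct", PySem.Set.len (PySem.Set.inter (PySem.Set.inter ys bs) ls))]

-- ===== PORT B =====
structure pvVenn where
  your_only : Int
  baseline_only : Int
  llama_only : Int
  your_baseline : Int
  your_llama : Int
  baseline_llama : Int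
  all_correct : Int
deriving DecidableEq, Repr

def generate_venn_data_alt (your_results : List (String × List (String × Bool))) (baseline_results : List (String × List (String × Bool))) (llama_results : List (String × List (String × Bool))) : List (String × Int) :=
  let c : pvVenn :=
    your_results.foldl (fun c p =>
      match pvTri your_results baseline_results llama_results p.1 with
      | some t =>
        if t.1 && t.2.1 && t.2.2 then { c with all_correct := c.all_correct + 1 }
        else if t.1 && t.2.1 then { c with your_baseline := c.your_baseline + 1 }
        else if t.1 && t.2.2 then { c with your_llama := c.your_llama + 1 }
        else if t.2.1 && t.2.2 then { c with baseline_llama := c.baseline_llama + 1 }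
        else if t.1 then { c with your_only := c.your_only + 1 }
        else if t.2.1 then { c with baseline_only := c.baseline_only + 1 }
        else if t.2.2 then { c with llama_only := c.llama_only + 1 }
        else c
      | none => c) ⟨0, 0, 0, 0, 0, 0, 0⟩
  [("your_only", c.your_only), ("baseline_only", c.baseline_only),
   ("llama_only", c.llama_only), ("your_baseline", c.your_baseline),
   ("your_llama", c.your_llama), ("baseline_llama", c.baseline_llama),
   ("all_correct", c.all_correct)]

-- ===== PRECONDITION & SPEC =====
-- Pre_ excludes association lists in which a key of your_results repeats: such a list does not
-- encode a Python dict (the real arguments are dicts, whose keys are unique — duplicates get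
-- merged before either Python ever runs), and on it A's set would count the repeated id once
-- while B's per-entry counter counts each occurrence.
def Pre_generate_venn_data (your_results : List (String × List (String × Bool))) (baseline_results : List (String × List (String × Bool))) (llama_results : List (String × List (String × Bool))) : Prop :=
  (your_results.map Prod.fst).Nodup
instance (your_results : List (String × List (String × Bool))) (baseline_results : List (String × List (String × Bool))) (llama_results : List (String × List (String × Bool))) : Decidable (Pre_generate_venn_data your_results baseline_results llama_results) := by unfold Pre_generate_venn_data; infer_instance

def pvWitness_generate_venn_data : (List (String × List (String × Bool))) × (List (String × List (String × Bool))) × (List (String × List (String × Bool))) :=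
  ([("a", [("correct", true)]), ("b", [("correct", false)])],
   [("a", [("correct", true)])],
   [("a", [("correct", false)])])

def Spec_generate_venn_data (your_results : List (String × List (String × Bool))) (baseline_results : List (String × List (String × Bool))) (llama_results : List (String × List (String × Bool))) (out : List (String × Int)) : Prop := out = generate_venn_data_alt your_results baseline_results llama_results
instance (your_results : List (String × List (String × Bool))) (baseline_results : List (String × List (String × Bool))) (llama_results : List (String × List (String × Bool))) (out : List (String × Int)) : Decidable (Spec_generate_venn_data your_results baseline_results llama_results out) := by unfold Spec_generate_venn_data; infer_instance

-- ===== CLAIM (what is proved, stated in full; the proofs are below) =====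
def Claim_equal_generate_venn_data : Prop := ∀ (your_results : List (String × List (String × Bool))) (baseline_results : List (String × List (String × Bool))) (llama_results : List (String × List (String × Bool))), Dom_generate_venn_data your_results baseline_results llama_results → Pre_generate_venn_data your_results baseline_results llama_results → Spec_generate_venn_data your_results baseline_results llama_results (generate_venn_data your_results baseline_results llama_results)

-- ===== LEMMAS AND PROOFS =====

-- key predicates: "this sample id classifies with yours/baseline/llama correct"
def pvCY (y b l : List (String × List (String × Bool))) (sid : String) : Bool :=
  match pvTri y b l sid with | some t => t.1 | none => false
def pvCB (y b l : List (String × List (String × Bool))) (sid : String) : Bool :=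
  match pvTri y b l sid with | some t => t.2.1 | none => false
def pvCL (y b l : List (String × List (String × Bool))) (sid : String) : Bool :=
  match pvTri y b l sid with | some t => t.2.2 | none => false

theorem pv_contains_filter {x : String} {K : List String} {c : String → Bool} (hx : x ∈ K) :
    PySem.Set.contains (K.filter c) x = c x := by
  by_cases h : c x = true
  · rw [h, (PySem.Set.contains_iff _ _).mpr (List.mem_filter.mpr ⟨hx, h⟩)]
  · have hx' : x ∉ K.filter c := fun hm => h (List.mem_filter.mp hm).2
    have h2 : ¬ PySem.Set.contains (K.filter c) x = true :=
      fun hc => hx' ((PySem.Set.contains_iff _ _).mp hc)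
    simp only [Bool.not_eq_true] at h2 h
    rw [h2, h]

theorem pv_diff (K : List String) (a b : String → Bool) :
    PySem.Set.diff (K.filter a) (K.filter b) = K.filter (fun x => a x && !b x) := by
  show (K.filter a).filter (fun x => !PySem.Set.contains (K.filter b) x) = _
  rw [List.filter_filter]
  exact List.filter_congr (fun x hx => by rw [pv_contains_filter hx, Bool.and_comm])

theorem pv_inter (K : List String) (a b : String → Bool) :
    PySem.Set.inter (K.filter a) (K.filter b) = K.filter (fun x => a x && b x) := by
  show (K.filter a).filter (fun x => PySem.Set.contains (K.filter b) x) = _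
  rw [List.filter_filter]
  exact List.filter_congr (fun x hx => by rw [pv_contains_filter hx, Bool.and_comm])

theorem pv_foldl_triple {β : Type} (f1 f2 f3 : PySem.Set String → β → PySem.Set String)
    (L : List β) (a b c : PySem.Set String) :
    L.foldl (fun st p => (f1 st.1 p, f2 st.2.1 p, f3 st.2.2 p)) (a, b, c)
      = (L.foldl f1 a, L.foldl f2 b, L.foldl f3 c) :=
  (PySem.List.foldl_prod_mk f1 (fun s e => (f2 s.1 e, f3 s.2 e)) L a (b, c)).trans
    (by rw [PySem.List.foldl_prod_mk])

-- A's conditional-add loop over a duplicate-free key list builds the filtered key list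
theorem pv_fold_set (cond : (String × List (String × Bool)) → Bool)
    (L : List (String × List (String × Bool))) (s : List String)
    (hnd : (L.map Prod.fst).Nodup) (hdis : ∀ p ∈ L, p.1 ∉ s) :
    L.foldl (fun s p => if cond p then PySem.Set.add s p.1 else s) s
      = s ++ (L.filter cond).map Prod.fst := by
  induction L generalizing s with
  | nil => simp
  | cons p L ih =>
    simp only [List.map_cons, List.nodup_cons] at hnd
    have hps : p.1 ∉ s := hdis p (List.mem_cons_self)
    have hdis' : ∀ q ∈ L, q.1 ∉ PySem.Set.add s p.1 := by
      intro q hq hmem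
      rw [PySem.Set.add_of_not_mem hps] at hmem
      rcases List.mem_append.mp hmem with h | h
      · exact hdis q (List.mem_cons_of_mem _ hq) h
      · have hq1 : q.1 = p.1 := List.mem_singleton.mp h
        exact hnd.1 (hq1 ▸ List.mem_map_of_mem (f := Prod.fst) hq)
    cases hc : cond p with
    | false =>
      simp only [List.foldl_cons, List.filter_cons, hc, Bool.false_eq_true, if_false]
      exact ih s hnd.2 (fun q hq => hdis q (List.mem_cons_of_mem _ hq))
    | true =>
      simp only [List.foldl_cons, List.filter_cons, hc, if_true]
      rw [ih (PySem.Set.add s p.1) hnd.2 hdis', PySem.Set.add_of_not_mem hps]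
      simp

-- B's counting loop computes the seven region counts
theorem pv_fold_count (y b l : List (String × List (String × Bool)))
    (L : List (String × List (String × Bool))) (c : pvVenn) :
    L.foldl (fun c p =>
      match pvTri y b l p.1 with
      | some t =>
        if t.1 && t.2.1 && t.2.2 then { c with all_correct := c.all_correct + 1 }
        else if t.1 && t.2.1 then { c with your_baseline := c.your_baseline + 1 }
        else if t.1 && t.2.2 then { c with your_llama := c.your_llama + 1 }
        else if t.2.1 && t.2.2 then { c with baseline_llama := c.baseline_llama + 1 }
        else if t.1 then { c with your_only := c.your_only + 1 }
        else if t.2.1 then { c with baseline_only := c.baseline_only + 1 }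
        else if t.2.2 then { c with llama_only := c.llama_only + 1 }
        else c
      | none => c) c
    = ⟨c.your_only + (L.countP (fun p => pvCY y b l p.1 && !pvCB y b l p.1 && !pvCL y b l p.1) : Int),
       c.baseline_only + (L.countP (fun p => pvCB y b l p.1 && !pvCY y b l p.1 && !pvCL y b l p.1) : Int),
       c.llama_only + (L.countP (fun p => pvCL y b l p.1 && !pvCY y b l p.1 && !pvCB y b l p.1) : Int),
       c.your_baseline + (L.countP (fun p => pvCY y b l p.1 && (pvCB y b l p.1 && !pvCL y b l p.1)) : Int),
       c.your_llama + (L.countP (fun p => pvCY y b l p.1 && (pvCL y b l p.1 && !pvCB y b l p.1)) : Int),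
       c.baseline_llama + (L.countP (fun p => pvCB y b l p.1 && (pvCL y b l p.1 && !pvCY y b l p.1)) : Int),
       c.all_correct + (L.countP (fun p => pvCY y b l p.1 && pvCB y b l p.1 && pvCL y b l p.1) : Int)⟩ := by
  induction L generalizing c with
  | nil => simp
  | cons p L ih =>
    simp only [List.foldl_cons, List.countP_cons]
    rw [ih]
    cases h : pvTri y b l p.1 with
    | none => simp [pvCY, pvCB, pvCL, h]
    | some t =>
      obtain ⟨a, t2⟩ := t; obtain ⟨b2, c2⟩ := t2
      cases a <;> cases b2 <;> cases c2 <;>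
        simp [pvCY, pvCB, pvCL, h] <;> omega

-- ===== VERDICT (by name: the statement is the Claim_ definition above) =====
theorem generate_venn_data_spec : Claim_equal_generate_venn_data := by
  intro y b l _ hpre
  unfold Spec_generate_venn_data generate_venn_data generate_venn_data_alt
  have hmap : ∀ c : String → Bool,
      (y.filter (fun p => c p.1)).map Prod.fst = (y.map Prod.fst).filter c := by
    intro c; rw [List.filter_map]; rfl
  have hstep :
      (fun (st : PySem.Set String × PySem.Set String × PySem.Set String)
           (p : String × List (String × Bool)) =>
        match pvTri y b l p.1 with
        | some t =>
          ((if t.1 then PySem.Set.add st.1 p.1 else st.1),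
           (if t.2.1 then PySem.Set.add st.2.1 p.1 else st.2.1),
           (if t.2.2 then PySem.Set.add st.2.2 p.1 else st.2.2))
        | none => st)
      = fun st p =>
        ((if pvCY y b l p.1 then PySem.Set.add st.1 p.1 else st.1),
         (if pvCB y b l p.1 then PySem.Set.add st.2.1 p.1 else st.2.1),
         (if pvCL y b l p.1 then PySem.Set.add st.2.2 p.1 else st.2.2)) := by
    funext st p
    cases h : pvTri y b l p.1 with
    | none => simp [pvCY, pvCB, pvCL, h]
    | some t => simp [pvCY, pvCB, pvCL, h]
  have hfold :
      y.foldl (fun (st : PySem.Set String × PySem.Set String × PySem.Set String) p =>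
        match pvTri y b l p.1 with
        | some t =>
          ((if t.1 then PySem.Set.add st.1 p.1 else st.1),
           (if t.2.1 then PySem.Set.add st.2.1 p.1 else st.2.1),
           (if t.2.2 then PySem.Set.add st.2.2 p.1 else st.2.2))
        | none => st) (PySem.Set.empty, PySem.Set.empty, PySem.Set.empty)
      = ((y.map Prod.fst).filter (pvCY y b l),
         (y.map Prod.fst).filter (pvCB y b l),
         (y.map Prod.fst).filter (pvCL y b l)) := by
    rw [hstep]
    refine (pv_foldl_triple
      (fun s p => if pvCY y b l p.1 then PySem.Set.add s p.1 else s)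
      (fun s p => if pvCB y b l p.1 then PySem.Set.add s p.1 else s)
      (fun s p => if pvCL y b l p.1 then PySem.Set.add s p.1 else s) y [] [] []).trans ?_
    rw [pv_fold_set _ y [] hpre (by simp), pv_fold_set _ y [] hpre (by simp),
        pv_fold_set _ y [] hpre (by simp)]
    simp only [List.nil_append, hmap]
  rw [hfold, pv_fold_count y b l y ⟨0,0,0,0,0,0,0⟩]
  simp only [pv_diff, pv_inter]
  simp only [PySem.Set.len, ← List.countP_eq_length_filter, List.countP_map]
  simp [Function.comp_def]
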